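-- pv_equiv track=rewrite | github.com/Reims796/middle | ft_oct_num.py | ft_oct_num
-- ===== SOURCE A (Python) =====
-- def ft_oct_num(a):
--     b = 1
--     c = 0
--     while a > 0:
--         c += a % 8 * b
--         b *= 10
--         a //= 8
--     return c
-- ===== SOURCE B (Python) =====
-- def ft_oct_num(a):
--     if a <= 0:
--         return 0
--     return int(oct(a)[2:])
-- ===== Notes on version B (the rewrite author's own statement) =====
-- stated objective: idiomatic
-- what changed: Replaces the while-loop with its growing power-of-ten place multiplier by the library route: oct() renders the base-8 digit string and int() reads those digits back as a decimal number.
import Mathlib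
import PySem

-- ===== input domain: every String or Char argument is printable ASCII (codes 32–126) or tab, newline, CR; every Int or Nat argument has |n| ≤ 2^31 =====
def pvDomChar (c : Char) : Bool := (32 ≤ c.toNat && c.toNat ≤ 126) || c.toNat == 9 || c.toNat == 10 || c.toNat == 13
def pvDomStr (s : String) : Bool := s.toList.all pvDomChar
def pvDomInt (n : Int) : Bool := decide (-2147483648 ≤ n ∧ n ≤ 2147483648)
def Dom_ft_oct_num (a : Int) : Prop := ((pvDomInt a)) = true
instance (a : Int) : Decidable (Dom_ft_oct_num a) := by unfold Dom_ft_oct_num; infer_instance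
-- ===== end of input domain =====

-- B replaces A's place-value accumulator loop by the library route oct()+int(): it builds the
-- base-8 digit list and then folds it most-significant-first as a decimal number (idiomatic).


-- ===== PORT A =====
-- the while-loop of A, state (a, b, c)
def ft_oct_num_loop (a b c : Int) : Int :=
  if h : a > 0 then
    ft_oct_num_loop (PySem.Int.floordiv a 8) (b * 10) (c + PySem.Int.mod a 8 * b)
  else c
termination_by a.toNat
decreasing_by
  have : PySem.Int.floordiv a 8 = a / 8 := PySem.Int.floordiv_eq_ediv_of_pos (by omega)
  rw [this]; omega

def ft_oct_num (a : Int) : Int := ft_oct_num_loop a 1 0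

-- ===== PORT B =====
-- oct(a)[2:] as the list of base-8 digits, most significant first (hand port of the library
-- call oct(); exact for a > 0, the only case B reaches it)
def pvOctDigits (a : Int) : List Int :=
  if h : a ≤ 0 then []
  else pvOctDigits (PySem.Int.floordiv a 8) ++ [PySem.Int.mod a 8]
termination_by a.toNat
decreasing_by
  have : PySem.Int.floordiv a 8 = a / 8 := PySem.Int.floordiv_eq_ediv_of_pos (by omega)
  rw [this]; omega

-- int(<digit string>): reading the digit list as a decimal number (hand port of int(); exact
-- on nonempty digit strings)
def pvDecRead (ds : List Int) : Int :=
  ds.foldl (fun acc d => acc * 10 + d) 0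

def ft_oct_num_alt (a : Int) : Int :=
  if a ≤ 0 then 0
  else pvDecRead (pvOctDigits a)

-- ===== PRECONDITION & SPEC =====
def Spec_ft_oct_num (a : Int) (out : Int) : Prop := out = ft_oct_num_alt a
instance (a : Int) (out : Int) : Decidable (Spec_ft_oct_num a out) := by unfold Spec_ft_oct_num; infer_instance

-- ===== CLAIM (what is proved, stated in full; the proofs are below) =====
def Claim_equal_ft_oct_num : Prop := ∀ (a : Int), Dom_ft_oct_num a → Spec_ft_oct_num a (ft_oct_num a)

-- ===== LEMMAS AND PROOFS =====
theorem pvDecRead_append (l : List Int) (d : Int) :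
    pvDecRead (l ++ [d]) = pvDecRead l * 10 + d := by
  simp [pvDecRead, List.foldl_append]

theorem ft_oct_num_loop_eq (a b c : Int) :
    ft_oct_num_loop a b c = c + b * pvDecRead (pvOctDigits a) := by
  induction a using pvOctDigits.induct generalizing b c with
  | case1 a h =>
    rw [ft_oct_num_loop, pvOctDigits]
    simp [h, not_lt.mpr h, pvDecRead]
  | case2 a h ih =>
    rw [ft_oct_num_loop, pvOctDigits]
    simp only [not_le] at h
    rw [dif_pos h, dif_neg (by omega), ih, pvDecRead_append]
    ring

-- ===== VERDICT (by name: the statement is the Claim_ definition above) =====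
theorem ft_oct_num_spec : Claim_equal_ft_oct_num := by
  intro a _
  show ft_oct_num a = ft_oct_num_alt a
  rw [ft_oct_num, ft_oct_num_loop_eq, ft_oct_num_alt]
  split
  · next h => rw [pvOctDigits, dif_pos h]; simp [pvDecRead]
  · ring
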